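-- pv_equiv track=rewrite | github.com/pypi-data/pypi-mirror-397 | packages/infrahub-server/infrahub_server-1.5.4.tar.gz/infrahub_server-1.5.4/backend/infrahub/core/schema/schema_branch.py | _is_attr_combination_unique
-- ===== SOURCE A (Python) =====
-- from itertools import chain, combinations
--
-- def _is_attr_combination_unique(
--     attrs_paths: list[str], uniqueness_constraints: list[list[str]] | None, unique_attribute_names: list[str]
-- ) -> bool:
--     """
--     Return whether at least one combination of any length of `attrs_paths` is unique
--     """
--     if unique_attribute_names:
--         for attr_path in attrs_paths:
--             for unique_attr_name in unique_attribute_names: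
--                 if attr_path.startswith(unique_attr_name):
--                     return True
--
--     if not uniqueness_constraints:
--         return False
--
--     unique_constraint_group_sets = [set(ucg) for ucg in uniqueness_constraints]
--     for i in range(1, len(attrs_paths) + 1):
--         for attr_combo in combinations(attrs_paths, i):
--             if any(ucg == set(attr_combo) for ucg in unique_constraint_group_sets):
--                 return True
--     return False
-- ===== SOURCE B (Python) =====
-- def _is_attr_combination_unique(
--     attrs_paths: list[str], uniqueness_constraints: list[list[str]] | None, unique_attribute_names: list[str]
-- ) -> bool:
--     if any(p.startswith(u) for p in attrs_paths for u in unique_attribute_names):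
--         return True
--     attrs = set(attrs_paths)
--     return any(ucg and set(ucg) <= attrs for ucg in uniqueness_constraints or [])
-- ===== Notes on version B (the rewrite author's own statement) =====
-- stated objective: alternative
-- what changed: Replaces the enumeration of all combinations of attrs_paths compared set-by-set against each constraint group with a single per-group test: a group matches some combination iff it is nonempty and a subset of set(attrs_paths).
import Mathlib
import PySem

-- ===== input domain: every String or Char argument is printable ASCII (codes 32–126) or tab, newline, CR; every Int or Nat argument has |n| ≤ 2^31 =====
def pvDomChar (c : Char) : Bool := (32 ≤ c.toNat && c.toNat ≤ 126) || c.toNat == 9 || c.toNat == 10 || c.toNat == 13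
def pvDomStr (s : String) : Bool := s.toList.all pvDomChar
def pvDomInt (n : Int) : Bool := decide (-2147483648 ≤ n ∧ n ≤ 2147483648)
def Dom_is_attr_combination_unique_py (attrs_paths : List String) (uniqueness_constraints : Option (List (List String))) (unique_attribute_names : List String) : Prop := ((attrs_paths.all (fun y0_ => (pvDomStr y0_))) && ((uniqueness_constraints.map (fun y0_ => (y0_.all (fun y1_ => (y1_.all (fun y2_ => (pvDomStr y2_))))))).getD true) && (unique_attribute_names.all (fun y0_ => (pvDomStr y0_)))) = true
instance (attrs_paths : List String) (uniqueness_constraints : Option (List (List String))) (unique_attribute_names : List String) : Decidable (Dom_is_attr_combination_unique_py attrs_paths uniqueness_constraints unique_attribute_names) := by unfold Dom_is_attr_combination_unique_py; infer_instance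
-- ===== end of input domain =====

-- B replaces A's enumeration of attribute combinations with a nonempty-subset test per constraint group (alternative algorithm, same results).



-- ===== PORT A =====
def is_attr_combination_unique_py (attrs_paths : List String) (uniqueness_constraints : Option (List (List String))) (unique_attribute_names : List String) : Bool :=
  -- first block: for attr_path in attrs_paths / for unique_attr_name in unique_attribute_names / startswith -> return True
  if unique_attribute_names ≠ [] ∧ attrs_paths.any (fun attr_path => unique_attribute_names.any (fun u => PySem.Str.startswith attr_path u)) then
    true
  else
    match uniqueness_constraints with
    | none => false
    | some ucs =>
      if ucs = [] then false
      else
        let unique_constraint_group_sets := ucs.map (fun ucg => PySem.Set.ofList ucg)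
        -- for i in range(1, len(attrs_paths)+1): for attr_combo in combinations(attrs_paths, i): ...
        -- itertools.combinations(attrs_paths, i) ported as List.sublistsLen i attrs_paths (same multiset of combinations)
        (List.range attrs_paths.length).any (fun i =>
          (List.sublistsLen (i + 1) attrs_paths).any (fun attr_combo =>
            unique_constraint_group_sets.any (fun ucg => PySem.Set.equal ucg (PySem.Set.ofList attr_combo))))

-- ===== PORT B =====
def is_attr_combination_unique_py_alt (attrs_paths : List String) (uniqueness_constraints : Option (List (List String))) (unique_attribute_names : List String) : Bool :=
  if attrs_paths.any (fun p => unique_attribute_names.any (fun u => PySem.Str.startswith p u)) then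
    true
  else
    let attrs := PySem.Set.ofList attrs_paths
    (uniqueness_constraints.getD []).any (fun ucg =>
      decide (ucg ≠ []) && PySem.Set.issubset (PySem.Set.ofList ucg) attrs)

-- ===== PRECONDITION & SPEC =====
def Spec_is_attr_combination_unique_py (attrs_paths : List String) (uniqueness_constraints : Option (List (List String))) (unique_attribute_names : List String) (out : Bool) : Prop := out = is_attr_combination_unique_py_alt attrs_paths uniqueness_constraints unique_attribute_names
instance (attrs_paths : List String) (uniqueness_constraints : Option (List (List String))) (unique_attribute_names : List String) (out : Bool) : Decidable (Spec_is_attr_combination_unique_py attrs_paths uniqueness_constraints unique_attribute_names out) := by unfold Spec_is_attr_combination_unique_py; infer_instance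

-- ===== CLAIM (what is proved, stated in full; the proofs are below) =====
def Claim_equal_is_attr_combination_unique_py : Prop := ∀ (attrs_paths : List String) (uniqueness_constraints : Option (List (List String))) (unique_attribute_names : List String), Dom_is_attr_combination_unique_py attrs_paths uniqueness_constraints unique_attribute_names → Spec_is_attr_combination_unique_py attrs_paths uniqueness_constraints unique_attribute_names (is_attr_combination_unique_py attrs_paths uniqueness_constraints unique_attribute_names)

-- ===== LEMMAS AND PROOFS =====

-- A group set equals the set of some nonempty combination of attrs
-- iff the group is nonempty and all of its members occur in attrs.
lemma combo_exists_iff (attrs : List String) (ucg : List String) :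
    (∃ i ∈ List.range attrs.length, ∃ c ∈ List.sublistsLen (i + 1) attrs,
        PySem.Set.equal (PySem.Set.ofList ucg) (PySem.Set.ofList c) = true)
      ↔ (ucg ≠ [] ∧ ∀ x ∈ ucg, x ∈ attrs) := by
  constructor
  · rintro ⟨i, hi, c, hc, heq⟩
    rw [List.mem_sublistsLen] at hc
    obtain ⟨hsub, hlen⟩ := hc
    rw [PySem.Set.equal_iff] at heq
    have hmem : ∀ x, x ∈ ucg ↔ x ∈ c := by
      intro x
      have := heq x
      simpa [PySem.Set.mem_ofList] using this
    have hcne : c ≠ [] := by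
      intro h; subst h; simp at hlen
    constructor
    · intro h
      obtain ⟨x, hx⟩ := List.exists_mem_of_ne_nil c hcne
      exact absurd ((hmem x).mpr hx) (by simp [h])
    · intro x hx
      exact hsub.subset ((hmem x).mp hx)
  · rintro ⟨hne, hsub⟩
    set c := attrs.filter (fun a => decide (a ∈ ucg)) with hcdef
    have hcsub : c.Sublist attrs := List.filter_sublist
    have hmemc : ∀ x, x ∈ c ↔ x ∈ attrs ∧ x ∈ ucg := by
      intro x; simp [hcdef, List.mem_filter]
    have hcne : c ≠ [] := by
      obtain ⟨x, hx⟩ := List.exists_mem_of_ne_nil ucg hne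
      intro h
      have : x ∈ c := (hmemc x).mpr ⟨hsub x hx, hx⟩
      simp [h] at this
    have hlpos : 0 < c.length := List.length_pos_of_ne_nil hcne
    have hlle : c.length ≤ attrs.length := hcsub.length_le
    refine ⟨c.length - 1, ?_, c, ?_, ?_⟩
    · rw [List.mem_range]; omega
    · rw [List.mem_sublistsLen]
      exact ⟨hcsub, by omega⟩
    · rw [PySem.Set.equal_iff]
      intro x
      simp only [PySem.Set.mem_ofList]
      rw [hmemc x]
      constructor
      · intro hx; exact ⟨hsub x hx, hx⟩
      · exact fun h => h.2

lemma core_eq (attrs : List String) (ucs : List (List String)) :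
    ((List.range attrs.length).any (fun i =>
        (List.sublistsLen (i + 1) attrs).any (fun c =>
          (ucs.map (fun ucg => PySem.Set.ofList ucg)).any
            (fun g => PySem.Set.equal g (PySem.Set.ofList c)))))
      = ucs.any (fun ucg =>
          decide (ucg ≠ []) && PySem.Set.issubset (PySem.Set.ofList ucg) (PySem.Set.ofList attrs)) := by
  rw [Bool.eq_iff_iff]
  simp only [List.any_eq_true, List.mem_map, Bool.and_eq_true, decide_eq_true_eq,
    PySem.Set.issubset_iff]
  constructor
  · rintro ⟨i, hi, c, hc, g, ⟨ucg, hucg, rfl⟩, heq⟩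
    obtain ⟨hne, hsub⟩ := (combo_exists_iff attrs ucg).mp ⟨i, hi, c, hc, heq⟩
    refine ⟨ucg, hucg, hne, ?_⟩
    intro x hx
    rw [PySem.Set.mem_ofList] at hx ⊢
    exact hsub x hx
  · rintro ⟨ucg, hucg, hne, hsub⟩
    have hsub' : ∀ x ∈ ucg, x ∈ attrs := by
      intro x hx
      have := hsub x (by rw [PySem.Set.mem_ofList]; exact hx)
      rwa [PySem.Set.mem_ofList] at this
    obtain ⟨i, hi, c, hc, heq⟩ := (combo_exists_iff attrs ucg).mpr ⟨hne, hsub'⟩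
    exact ⟨i, hi, c, hc, PySem.Set.ofList ucg, ⟨ucg, hucg, rfl⟩, heq⟩

-- ===== VERDICT (by name: the statement is the Claim_ definition above) =====
theorem is_attr_combination_unique_py_spec : Claim_equal_is_attr_combination_unique_py := by
  intro attrs_paths uniqueness_constraints unique_attribute_names _
  unfold Spec_is_attr_combination_unique_py
  unfold is_attr_combination_unique_py is_attr_combination_unique_py_alt
  have hguard : (unique_attribute_names ≠ [] ∧ attrs_paths.any
      (fun attr_path => unique_attribute_names.any (fun u => PySem.Str.startswith attr_path u)))
      ↔ (attrs_paths.any (fun p => unique_attribute_names.any (fun u => PySem.Str.startswith p u)) = true) := by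
    constructor
    · exact fun h => h.2
    · intro h
      refine ⟨?_, h⟩
      intro hnil
      subst hnil
      simp at h
  by_cases hg : attrs_paths.any (fun p => unique_attribute_names.any (fun u => PySem.Str.startswith p u)) = true
  · rw [if_pos (hguard.mpr hg), if_pos hg]
  · rw [if_neg (fun h => hg (hguard.mp h)), if_neg hg]
    cases uniqueness_constraints with
    | none => simp
    | some ucs =>
      simp only [Option.getD_some]
      by_cases hucs : ucs = []
      · subst hucs; simp
      · rw [if_neg hucs]
        exact core_eq attrs_paths ucs
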